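-- pv_equiv track=rewrite | github.com/ahbreck/AI_agent_experiments_MSDS_442 | Project_Phase_2/kb/normalize_ids_source_of_truth.py | collision_map
-- ===== SOURCE A (Python) =====
-- from collections import defaultdict
-- from typing import Dict, Iterable, List, Tuple
--
-- def collision_map(pairs: Iterable[Tuple[str, str]]) -> Dict[str, List[str]]:
--     bucket: Dict[str, set] = defaultdict(set)
--     for old, new in pairs:
--         if old != new:
--             bucket[new].add(old)
--     out: Dict[str, List[str]] = {}
--     for new_val, old_vals in bucket.items():
--         if len(old_vals) > 1:
--             out[new_val] = sorted(old_vals)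
--     return out
-- ===== SOURCE B (Python) =====
-- def collision_map(pairs):
--     # Filter once, then walk the distinct new-ids in first-occurrence order,
--     # scanning the filtered list per key (no hash-bucket accumulation).
--     filtered = [(old, new) for old, new in pairs if old != new]
--     out = {}
--     for new_val in dict.fromkeys(new for _, new in filtered):
--         olds = sorted({old for old, new in filtered if new == new_val})
--         if len(olds) > 1:
--             out[new_val] = olds
--     return out
-- ===== Notes on version B (the rewrite author's own statement) =====
-- stated objective: alternative
-- what changed: Replaces the single-pass defaultdict(set) bucket accumulation with filter-once, dedup the new-ids in first-occurrence order, then a per-key scan of the filtered pairs collecting each key's distinct olds.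
import Mathlib
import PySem

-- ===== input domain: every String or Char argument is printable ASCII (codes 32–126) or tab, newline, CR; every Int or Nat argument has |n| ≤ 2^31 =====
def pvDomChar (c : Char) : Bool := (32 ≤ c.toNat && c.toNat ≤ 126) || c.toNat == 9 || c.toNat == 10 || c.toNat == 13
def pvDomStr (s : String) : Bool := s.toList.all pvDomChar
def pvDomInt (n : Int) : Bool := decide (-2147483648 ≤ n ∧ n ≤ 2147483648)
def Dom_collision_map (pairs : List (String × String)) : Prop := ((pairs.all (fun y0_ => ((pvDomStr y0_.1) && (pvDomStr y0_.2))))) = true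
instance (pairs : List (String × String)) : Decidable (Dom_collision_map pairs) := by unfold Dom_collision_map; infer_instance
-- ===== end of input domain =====

-- B replaces the one-pass defaultdict(set) accumulation with filter-once + ordered key dedup + a per-key scan (alternative structure, same results).


-- ===== PORT A =====
def collision_map (pairs : List (String × String)) : List (String × List String) :=
  let bucket : PySem.Dict String (PySem.Set String) :=
    pairs.foldl (fun d p =>
      if p.1 ≠ p.2 then d.modify p.2 PySem.Set.empty (fun s => PySem.Set.add s p.1) else d)
      PySem.Dict.empty
  let out : PySem.Dict String (List String) :=
    bucket.items.foldl (fun o p =>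
      if PySem.Set.len p.2 > 1 then o.insert p.1 (PySem.List.sorted p.2 (fun x => x) false) else o)
      PySem.Dict.empty
  out.items

-- ===== PORT B =====
def collision_map_alt (pairs : List (String × String)) : List (String × List String) :=
  let filtered := pairs.filter (fun p => p.1 ≠ p.2)
  let out : PySem.Dict String (List String) :=
    (PySem.List.dedup (filtered.map Prod.snd)).foldl (fun o new_val =>
      let olds := PySem.List.sorted
        (PySem.Set.ofList ((filtered.filter (fun p => p.2 == new_val)).map Prod.fst))
        (fun x => x) false
      if PySem.List.len olds > 1 then o.insert new_val olds else o)
      PySem.Dict.empty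
  out.items

-- ===== PRECONDITION & SPEC =====
def Spec_collision_map (pairs : List (String × String)) (out : List (String × List String)) : Prop := out = collision_map_alt pairs
instance (pairs : List (String × String)) (out : List (String × List String)) : Decidable (Spec_collision_map pairs out) := by unfold Spec_collision_map; infer_instance

-- ===== CLAIM (what is proved, stated in full; the proofs are below) =====
def Claim_equal_collision_map : Prop := ∀ (pairs : List (String × String)), Dom_collision_map pairs → Spec_collision_map pairs (collision_map pairs)

-- ===== LEMMAS AND PROOFS =====

-- the bucket's value at key n is the set of first components of the filtered pairs whose second component is n
theorem getD_bucket (l : List (String × String)) (d : PySem.Dict String (PySem.Set String)) (n : String) :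
    (l.foldl (fun d p => d.modify p.2 PySem.Set.empty (fun s => PySem.Set.add s p.1)) d).getD n PySem.Set.empty
      = PySem.Set.update (d.getD n PySem.Set.empty) ((l.filter (fun p => p.2 == n)).map Prod.fst) := by
  induction l generalizing d with
  | nil => simp [PySem.Set.update]
  | cons p l ih =>
    simp only [List.foldl_cons, List.filter_cons]
    rw [ih, PySem.Dict.getD_modify]
    by_cases h : n = p.2
    · simp [h, PySem.Set.update]
    · have h2 : (p.2 == n) = false := by simp [Ne.symm h]
      simp [h, h2]

-- ===== VERDICT (by name: the statement is the Claim_ definition above) =====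
theorem collision_map_spec : Claim_equal_collision_map := by
  intro pairs _
  unfold Spec_collision_map collision_map collision_map_alt
  have hstep :
      List.foldl (fun d p => if p.1 ≠ p.2 then d.modify p.2 PySem.Set.empty (fun s => PySem.Set.add s p.1) else d)
        PySem.Dict.empty pairs
      = List.foldl (fun d p => d.modify p.2 PySem.Set.empty (fun s => PySem.Set.add s p.1))
        PySem.Dict.empty (pairs.filter (fun p => decide (p.1 ≠ p.2))) := by
    rw [List.foldl_filter]
    congr 1
    funext d p
    by_cases h : p.1 = p.2 <;> simp [h]
  rw [hstep]
  set F := pairs.filter (fun p => decide (p.1 ≠ p.2)) with hF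
  set bucket := F.foldl (fun d p => d.modify p.2 PySem.Set.empty (fun s => PySem.Set.add s p.1))
      PySem.Dict.empty with hb
  have hnd : bucket.keys.Nodup := by
    rw [hb]
    exact PySem.Dict.nodup_keys_foldl_modify_key F Prod.snd PySem.Set.empty
      (fun _ p => fun s => PySem.Set.add s p.1) PySem.Dict.empty PySem.Dict.nodup_keys_empty
  have hkeys : bucket.keys = PySem.List.dedup (F.map Prod.snd) := by
    rw [hb, PySem.Dict.keys_foldl_modify_key F Prod.snd PySem.Set.empty
      (fun _ p => fun s => PySem.Set.add s p.1) PySem.Dict.empty]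
    simp [PySem.Set.update, PySem.Set.ofList_eq_foldl, PySem.Dict.keys_empty]
  have hitems : bucket.items = bucket.keys.map (fun k => (k, bucket.getD k PySem.Set.empty)) :=
    PySem.Dict.items_eq_map_keys bucket hnd PySem.Set.empty
  simp only [hitems, hkeys, List.foldl_map]
  refine congrArg PySem.Dict.items ?_
  apply PySem.List.foldl_congr_mem
  intro o n _
  rw [hb, getD_bucket]
  have hget : PySem.Set.update (PySem.Dict.empty.getD n PySem.Set.empty)
      ((F.filter (fun p => p.2 == n)).map Prod.fst)
      = PySem.Set.ofList ((F.filter (fun p => p.2 == n)).map Prod.fst) := by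
    simp [PySem.Set.update, PySem.Set.ofList_eq_foldl, PySem.Dict.getD_empty, PySem.Set.empty]
  rw [hget]
  set olds := PySem.Set.ofList ((F.filter (fun p => p.2 == n)).map Prod.fst) with ho
  have hlen : PySem.List.len (PySem.List.sorted olds (fun x => x) false) = PySem.Set.len olds := by
    simp [PySem.List.len_eq, PySem.List.length_sorted, PySem.Set.len]
  rw [hlen]
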